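-- pv_equiv track=rewrite | github.com/chawresh/GSYV | GSYV.py | generate_shortcode
-- ===== SOURCE A (Python) =====
-- def generate_shortcode(name, existing_codes):
--     shortcode = name[:3].upper()
--     if shortcode in existing_codes:
--         i = 1
--         while f"{shortcode}{i}" in existing_codes:
--             i += 1
--         shortcode = f"{shortcode}{i}"
--     return shortcode
-- ===== SOURCE B (Python) =====
-- def generate_shortcode(name, existing_codes):
--     base = name[:3].upper()
--     n = len(base)
--     # every suffix that appears after the base among the existing codes
--     sufs = {c[n:] for c in existing_codes if c.startswith(base)}
--     # the canonical positive decimal suffixes, in increasing numeric order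
--     # (for canonical numerals, numeric order == order by (length, lexicographic))
--     numerals = sorted((s for s in sufs if s.isdigit() and not s.startswith("0")),
--                       key=lambda s: (len(s), s))
--     # walk the sorted numerals to find the first gap in 1,2,3,...
--     i = 1
--     for s in numerals:
--         if s != str(i):
--             break
--         i += 1
--     return base + str(i) if "" in sufs else base
-- ===== Notes on version B (the rewrite author's own statement) =====
-- stated objective: alternative
-- what changed: Instead of probing candidates base, base1, base2, ... one by one against the list, B inverts the scan: one pass over existing_codes strips the base prefix into a suffix set, the canonical positive decimal suffixes are sorted into numeric order (= order by (length, lex)), and the answer's number is the first gap in that sorted sequence.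
import Mathlib
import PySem

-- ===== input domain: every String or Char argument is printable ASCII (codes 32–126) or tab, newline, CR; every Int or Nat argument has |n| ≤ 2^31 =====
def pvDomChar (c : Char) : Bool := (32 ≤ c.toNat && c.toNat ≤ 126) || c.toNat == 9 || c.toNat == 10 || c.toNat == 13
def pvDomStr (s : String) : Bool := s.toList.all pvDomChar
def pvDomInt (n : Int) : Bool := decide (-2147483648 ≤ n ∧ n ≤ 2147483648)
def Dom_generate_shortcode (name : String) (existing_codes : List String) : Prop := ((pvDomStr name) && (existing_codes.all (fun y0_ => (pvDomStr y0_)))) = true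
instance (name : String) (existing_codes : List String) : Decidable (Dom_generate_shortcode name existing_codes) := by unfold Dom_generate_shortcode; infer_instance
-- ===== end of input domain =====

-- B inverts A's probe loop: one pass strips the base prefix off the existing codes, the
-- canonical decimal suffixes are sorted into numeric order, and a linear scan finds the
-- first gap — same return value, a different (sort-then-scan) algorithm.


-- ===== PORT A =====
-- A's while-loop; fuel = existing.length + 1 steps always suffice (the loop scans pairwise
-- distinct candidates base+"1" … base+"len+1", and at most len of them can be in the list),
-- so the fuel-0 branch is unreachable — it returns the current candidate, as the loop would.
def gsLoop (base : String) (existing : List String) : Int → Nat → String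
  | i, 0 => base ++ PySem.Int.toStr i
  | i, fuel + 1 =>
    if existing.contains (base ++ PySem.Int.toStr i) then gsLoop base existing (i + 1) fuel
    else base ++ PySem.Int.toStr i

def generate_shortcode (name : String) (existing_codes : List String) : String :=
  let shortcode := PySem.Str.upper (PySem.Str.slice name none (some 3))
  if existing_codes.contains shortcode then gsLoop shortcode existing_codes 1 (existing_codes.length + 1)
  else shortcode

-- ===== PORT B =====
-- Source B's gap loop: walk the numerically sorted canonical suffixes; stop at the first i
-- whose decimal string is missing.
def gapScan : List String → Int → Int
  | [], i => i
  | s :: rest, i => if s = PySem.Int.toStr i then gapScan rest (i + 1) else i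

def generate_shortcode_alt (name : String) (existing_codes : List String) : String :=
  let base := PySem.Str.upper (PySem.Str.slice name none (some 3))
  let n := PySem.Str.len base
  let sufs : PySem.Set String := PySem.Set.ofList
    ((existing_codes.filter (fun c => PySem.Str.startswith c base)).map
      (fun c => PySem.Str.slice c (some n) none))
  let numerals := PySem.List.sorted2
    (sufs.filter (fun s => PySem.Str.strIsdigit s && !PySem.Str.startswith s "0"))
    (fun s => PySem.Str.len s) (fun s => s)
  let i := gapScan numerals 1
  if PySem.Set.contains sufs "" then base ++ PySem.Int.toStr i else base

-- ===== PRECONDITION & SPEC =====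
def Spec_generate_shortcode (name : String) (existing_codes : List String) (out : String) : Prop := out = generate_shortcode_alt name existing_codes
instance (name : String) (existing_codes : List String) (out : String) : Decidable (Spec_generate_shortcode name existing_codes out) := by unfold Spec_generate_shortcode; infer_instance

-- ===== CLAIM (what is proved, stated in full; the proofs are below) =====
def Claim_equal_generate_shortcode : Prop := ∀ (name : String) (existing_codes : List String), Dom_generate_shortcode name existing_codes → Spec_generate_shortcode name existing_codes (generate_shortcode name existing_codes)

-- ===== LEMMAS AND PROOFS =====

-- decimal value of a digit string, and canonicity (nonempty, digits only, no leading zero)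
def pvVal (cs : List Char) : Nat := cs.foldl (fun a c => a * 10 + (c.toNat - 48)) 0

def pvCanon (cs : List Char) : Prop :=
  cs ≠ [] ∧ (∀ c ∈ cs, '0' ≤ c ∧ c ≤ '9') ∧ cs.head? ≠ some '0'

lemma pvVal_append_singleton (cs : List Char) (c : Char) :
    pvVal (cs ++ [c]) = pvVal cs * 10 + (c.toNat - 48) := by
  simp [pvVal, List.foldl_append]

lemma pv_foldl_acc (cs : List Char) : ∀ a : Nat,
    cs.foldl (fun a c => a * 10 + (c.toNat - 48)) a = a * 10 ^ cs.length + pvVal cs := by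
  induction cs with
  | nil => intro a; simp [pvVal]
  | cons c t ih =>
    intro a
    have h1 := ih (a * 10 + (c.toNat - 48))
    have h2 := ih (0 * 10 + (c.toNat - 48))
    show List.foldl _ (a * 10 + (c.toNat - 48)) t = a * 10 ^ (c :: t).length + pvVal (c :: t)
    have h3 : pvVal (c :: t) = (0 * 10 + (c.toNat - 48)) * 10 ^ t.length + pvVal t := h2
    rw [h1, h3, List.length_cons]
    ring

lemma pvVal_cons (c : Char) (cs : List Char) :
    pvVal (c :: cs) = (c.toNat - 48) * 10 ^ cs.length + pvVal cs := by
  have h2 : pvVal (c :: cs) = (0 * 10 + (c.toNat - 48)) * 10 ^ cs.length + pvVal cs :=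
    pv_foldl_acc cs (0 * 10 + (c.toNat - 48))
  rw [h2]
  ring

lemma pv_char_le_toNat {c d : Char} (h : c ≤ d) : c.toNat ≤ d.toNat := by
  simpa [Char.le_def, UInt32.le_iff_toNat_le] using h

lemma pv_char_lt_toNat {c d : Char} (h : c < d) : c.toNat < d.toNat := by
  simpa [Char.lt_def, UInt32.lt_iff_toNat_lt] using h

lemma pvVal_lt (cs : List Char) (h : ∀ c ∈ cs, '0' ≤ c ∧ c ≤ '9') :
    pvVal cs < 10 ^ cs.length := by
  induction cs with
  | nil => simp [pvVal]
  | cons c t ih =>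
    have hc := h c (by simp)
    have h9 : c.toNat ≤ 57 := by
      have := pv_char_le_toNat hc.2; simpa using this
    have hv : pvVal t < 10 ^ t.length := ih (fun x hx => h x (by simp [hx]))
    have hcv : c.toNat - 48 ≤ 9 := by omega
    rw [pvVal_cons, List.length_cons, pow_succ]
    nlinarith

lemma pv_char_eq_of_toNat {c d : Char} (h : c.toNat = d.toNat) : c = d :=
  Char.ext (UInt32.toNat_inj.mp h)

lemma pv_canon_lb (cs : List Char) (h : pvCanon cs) : 10 ^ (cs.length - 1) ≤ pvVal cs := by
  obtain ⟨hne, hdig, hhead⟩ := h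
  cases cs with
  | nil => exact absurd rfl hne
  | cons c t =>
    have hc := hdig c (by simp)
    have h0 : 48 ≤ c.toNat := by
      have := pv_char_le_toNat hc.1; simpa using this
    have hc0 : c.toNat ≠ 48 := by
      intro hx
      exact hhead (by simp [pv_char_eq_of_toNat (hx.trans (by decide : (48:Nat) = ('0':Char).toNat).symm ▸ rfl : c.toNat = ('0':Char).toNat)])
    have h1 : 1 ≤ c.toNat - 48 := by omega
    rw [pvVal_cons]
    have : 10 ^ t.length ≤ (c.toNat - 48) * 10 ^ t.length := Nat.le_mul_of_pos_left _ (by omega)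
    simpa using le_trans this (Nat.le_add_right _ _)

lemma pv_canon_pos (cs : List Char) (h : pvCanon cs) : 1 ≤ pvVal cs := by
  have := pv_canon_lb cs h
  have : (1:Nat) ≤ 10 ^ (cs.length - 1) := Nat.one_le_pow _ _ (by omega)
  omega

-- toDigitsCore plumbing
lemma pv_toDigitsCore_append (b : Nat) :
    ∀ (f n : Nat) (l : List Char), Nat.toDigitsCore b f n l = Nat.toDigitsCore b f n [] ++ l
  | 0, n, l => by simp [Nat.toDigitsCore]
  | f + 1, n, l => by
    simp only [Nat.toDigitsCore]
    by_cases h : n / b = 0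
    · simp [h]
    · simp only [h, if_false]
      rw [pv_toDigitsCore_append b f (n / b) ((n % b).digitChar :: l),
          pv_toDigitsCore_append b f (n / b) [(n % b).digitChar]]
      simp

lemma pv_core_fuel : ∀ (m f g : Nat), m < f → m < g →
    Nat.toDigitsCore 10 f m [] = Nat.toDigitsCore 10 g m [] := by
  intro m
  induction m using Nat.strong_induction_on with
  | _ m ih =>
    intro f g hf hg
    cases f with
    | zero => omega
    | succ f =>
      cases g with
      | zero => omega
      | succ g =>
        simp only [Nat.toDigitsCore]
        by_cases h0 : m / 10 = 0
        · simp [h0]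
        · have hm : 10 ≤ m := by omega
          simp only [h0, if_false]
          rw [pv_toDigitsCore_append 10 f (m / 10), pv_toDigitsCore_append 10 g (m / 10),
              ih (m / 10) (by omega) f g (by omega) (by omega)]

lemma pv_toDigits_lt10 (n : Nat) (h : n < 10) : Nat.toDigits 10 n = [Nat.digitChar n] := by
  simp [Nat.toDigits, Nat.toDigitsCore, Nat.div_eq_of_lt h, Nat.mod_eq_of_lt h]

lemma pv_toDigits_ge10 (n : Nat) (h : 10 ≤ n) :
    Nat.toDigits 10 n = Nat.toDigits 10 (n / 10) ++ [Nat.digitChar (n % 10)] := by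
  have h0 : ¬ n / 10 = 0 := by omega
  show Nat.toDigitsCore 10 (n + 1) n [] = _
  simp only [Nat.toDigitsCore, h0, if_false]
  rw [pv_toDigitsCore_append 10 n (n / 10),
      pv_core_fuel (n / 10) n (n / 10 + 1) (by omega) (by omega)]
  rfl

lemma pv_digitChar_val (k : Nat) (h : k < 10) : (Nat.digitChar k).toNat - 48 = k := by
  interval_cases k <;> decide

lemma pv_digitChar_digit (k : Nat) (h : k < 10) :
    '0' ≤ Nat.digitChar k ∧ Nat.digitChar k ≤ '9' := by
  interval_cases k <;> decide

lemma pv_digitChar_toNat (k : Nat) (h : k < 10) : (Nat.digitChar k).toNat = 48 + k := by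
  interval_cases k <;> decide

lemma pv_digitChar_inv (c : Char) (h0 : '0' ≤ c) (h9 : c ≤ '9') :
    Nat.digitChar (c.toNat - 48) = c := by
  have h1 : 48 ≤ c.toNat := by have := pv_char_le_toNat h0; simpa using this
  have h2 : c.toNat ≤ 57 := by have := pv_char_le_toNat h9; simpa using this
  apply pv_char_eq_of_toNat
  rw [pv_digitChar_toNat (c.toNat - 48) (by omega)]
  omega

lemma pv_val_toDigitsCore : ∀ (f n : Nat), n < f → pvVal (Nat.toDigitsCore 10 f n []) = n
  | 0, n, h => absurd h (Nat.not_lt_zero n)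
  | f + 1, n, h => by
    simp only [Nat.toDigitsCore]
    by_cases h0 : n / 10 = 0
    · have hn : n < 10 := Nat.lt_of_div_eq_zero (by norm_num) h0
      rw [if_pos h0]
      simp [pvVal, Nat.mod_eq_of_lt hn, pv_digitChar_val n hn]
    · simp only [h0, if_false]
      rw [pv_toDigitsCore_append 10 f (n / 10) [(n % 10).digitChar], pvVal_append_singleton,
          pv_val_toDigitsCore f (n / 10) (by omega),
          pv_digitChar_val (n % 10) (Nat.mod_lt n (by omega))]
      omega

lemma pv_val_toDigits (n : Nat) : pvVal (Nat.toDigits 10 n) = n :=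
  pv_val_toDigitsCore (n + 1) n (Nat.lt_succ_self n)

lemma pv_toDigits_ne_nil (n : Nat) : Nat.toDigits 10 n ≠ [] := by
  by_cases h : n < 10
  · rw [pv_toDigits_lt10 n h]; simp
  · rw [pv_toDigits_ge10 n (by omega)]; simp

lemma pv_toDigits_digits (n : Nat) : ∀ c ∈ Nat.toDigits 10 n, '0' ≤ c ∧ c ≤ '9' := by
  induction n using Nat.strong_induction_on with
  | _ n ih =>
    by_cases h : n < 10
    · rw [pv_toDigits_lt10 n h]
      intro c hc
      simp only [List.mem_singleton] at hc
      subst hc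
      exact pv_digitChar_digit n h
    · rw [pv_toDigits_ge10 n (by omega)]
      intro c hc
      rcases List.mem_append.mp hc with hc | hc
      · exact ih (n / 10) (by omega) c hc
      · simp only [List.mem_singleton] at hc
        subst hc
        exact pv_digitChar_digit _ (Nat.mod_lt n (by omega))

lemma pv_toDigits_head (n : Nat) (h : 1 ≤ n) : (Nat.toDigits 10 n).head? ≠ some '0' := by
  induction n using Nat.strong_induction_on with
  | _ n ih =>
    by_cases hn : n < 10
    · rw [pv_toDigits_lt10 n hn]
      have : 1 ≤ n := h
      interval_cases n <;> decide
    · rw [pv_toDigits_ge10 n (by omega)]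
      cases hl : Nat.toDigits 10 (n / 10) with
      | nil => exact absurd hl (pv_toDigits_ne_nil _)
      | cons a t =>
        have := ih (n / 10) (by omega) (by omega)
        rw [hl] at this
        simpa using this

lemma pv_canon_toDigits (n : Nat) (h : 1 ≤ n) : pvCanon (Nat.toDigits 10 n) :=
  ⟨pv_toDigits_ne_nil n, pv_toDigits_digits n, pv_toDigits_head n h⟩

-- uniqueness of the canonical decimal representation
lemma pv_canon_unique (cs : List Char) (h : pvCanon cs) : Nat.toDigits 10 (pvVal cs) = cs := by
  induction cs using List.reverseRecOn with
  | nil => exact absurd rfl h.1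
  | append_singleton ds d ih =>
    obtain ⟨-, hdig, hhead⟩ := h
    have hd := hdig d (by simp)
    have hd1 : 48 ≤ d.toNat := by have := pv_char_le_toNat hd.1; simpa using this
    have hd2 : d.toNat ≤ 57 := by have := pv_char_le_toNat hd.2; simpa using this
    by_cases hds : ds = []
    · subst hds
      have hv : pvVal [d] = d.toNat - 48 := by simp [pvVal]
      simp only [List.nil_append, hv]
      rw [pv_toDigits_lt10 _ (by omega), pv_digitChar_inv d hd.1 hd.2]
    · have hcanon : pvCanon ds := by
        refine ⟨hds, fun c hc => hdig c (by simp [hc]), ?_⟩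
        cases ds with
        | nil => exact absurd rfl hds
        | cons a t => simpa using hhead
      have hge : 1 ≤ pvVal ds := pv_canon_pos ds hcanon
      rw [pvVal_append_singleton]
      rw [pv_toDigits_ge10 _ (by omega)]
      have hdiv : (pvVal ds * 10 + (d.toNat - 48)) / 10 = pvVal ds := by omega
      have hmod : (pvVal ds * 10 + (d.toNat - 48)) % 10 = d.toNat - 48 := by omega
      rw [hdiv, hmod, ih hcanon, pv_digitChar_inv d hd.1 hd.2]

lemma pv_toStr_inj {i j : Int} (hi : 0 ≤ i) (hj : 0 ≤ j)
    (h : PySem.Int.toStr i = PySem.Int.toStr j) : i = j := by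
  have h2 : PySem.Int.toChars i = PySem.Int.toChars j := by
    have := congrArg String.toList h
    simpa [PySem.Int.toList_toStr] using this
  simp only [PySem.Int.toChars, if_neg (by omega : ¬ i < 0), if_neg (by omega : ¬ j < 0)] at h2
  have := congrArg pvVal h2
  rw [pv_val_toDigits, pv_val_toDigits] at this
  omega

lemma pv_toList_toStr_nonneg (i : Int) (hi : 0 ≤ i) :
    (PySem.Int.toStr i).toList = Nat.toDigits 10 i.toNat := by
  rw [PySem.Int.toList_toStr]
  simp [PySem.Int.toChars, if_neg (by omega : ¬ i < 0)]

lemma pv_val_toStr (i : Int) (hi : 0 ≤ i) : (pvVal (PySem.Int.toStr i).toList : Int) = i := by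
  rw [pv_toList_toStr_nonneg i hi, pv_val_toDigits]; omega

lemma pv_canon_eq_toStr (s : String) (h : pvCanon s.toList) :
    s = PySem.Int.toStr ((pvVal s.toList : Nat) : Int) := by
  apply String.toList_inj.mp
  rw [pv_toList_toStr_nonneg _ (by positivity)]
  simp only [Int.toNat_natCast]
  exact (pv_canon_unique s.toList h).symm

-- numeric order on canonical numerals = order by (length, lexicographic)
lemma pv_lex_val_lt : ∀ (a b : List Char), List.Lex (· < ·) a b →
    (∀ c ∈ a, '0' ≤ c ∧ c ≤ '9') → (∀ c ∈ b, '0' ≤ c ∧ c ≤ '9') → a.length = b.length →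
    pvVal a < pvVal b := by
  intro a b h
  induction h with
  | nil => intro _ _ hlen; simp at hlen
  | @cons x l1 l2 hlex ih =>
    intro ha hb hlen
    have hlen2 : l1.length = l2.length := by simpa using hlen
    have := ih (fun c hc => ha c (by simp [hc])) (fun c hc => hb c (by simp [hc])) hlen2
    rw [pvVal_cons, pvVal_cons, hlen2]
    omega
  | @rel x l1 y l2 hxy =>
    intro ha hb hlen
    have hlen2 : l1.length = l2.length := by simpa using hlen
    have hx := ha x (by simp)
    have hy := hb y (by simp)
    have hx1 : 48 ≤ x.toNat := by have := pv_char_le_toNat hx.1; simpa using this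
    have hy1 : 48 ≤ y.toNat := by have := pv_char_le_toNat hy.1; simpa using this
    have hxylt : x.toNat < y.toNat := pv_char_lt_toNat hxy
    have hva : pvVal l1 < 10 ^ l1.length :=
      pvVal_lt l1 (fun c hc => ha c (by simp [hc]))
    rw [pvVal_cons, pvVal_cons, hlen2]
    have hstep : (x.toNat - 48) * 10 ^ l2.length + 10 ^ l2.length ≤ (y.toNat - 48) * 10 ^ l2.length := by
      have : (x.toNat - 48) + 1 ≤ y.toNat - 48 := by omega
      calc (x.toNat - 48) * 10 ^ l2.length + 10 ^ l2.length
          = ((x.toNat - 48) + 1) * 10 ^ l2.length := by ring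
        _ ≤ (y.toNat - 48) * 10 ^ l2.length := Nat.mul_le_mul_right _ this
    rw [hlen2] at hva
    omega

lemma pv_key_val_lt (a b : List Char) (ha : pvCanon a) (hb : pvCanon b)
    (h : a.length < b.length ∨ (a.length = b.length ∧ List.Lex (· < ·) a b)) :
    pvVal a < pvVal b := by
  rcases h with h | ⟨hlen, hlex⟩
  · have h1 : pvVal a < 10 ^ a.length := pvVal_lt a ha.2.1
    have h2 : 10 ^ (b.length - 1) ≤ pvVal b := pv_canon_lb b hb
    have h3 : (10:Nat) ^ a.length ≤ 10 ^ (b.length - 1) :=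
      Nat.pow_le_pow_right (by omega) (by omega)
    omega
  · exact pv_lex_val_lt a b hlex ha.2.1 hb.2.1 hlen

-- B's filter predicate is exactly canonicity
lemma pv_pred_iff (s : String) :
    (PySem.Str.strIsdigit s && !PySem.Str.startswith s "0") = true ↔ pvCanon s.toList := by
  have h0 : ("0" : String).toList = ['0'] := rfl
  simp only [PySem.Str.strIsdigit, PySem.Chars.strIsdigit, PySem.Str.startswith,
    PySem.Chars.startswith, h0, pvCanon]
  cases hl : s.toList with
  | nil => simp
  | cons c t =>
    simp only [List.isEmpty_cons, List.all_eq_true, List.isPrefixOf, Bool.and_eq_true,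
      Bool.not_eq_true', List.head?_cons, PySem.Chars.isdigit]
    constructor
    · rintro ⟨⟨-, hall⟩, hpre⟩
      refine ⟨by simp, ?_, ?_⟩
      · intro x hx
        have := hall x hx
        simpa using this
      · intro hc
        simp only [Option.some.injEq] at hc
        subst hc
        simp at hpre
    · rintro ⟨-, hall, hhead⟩
      refine ⟨⟨by simp, ?_⟩, ?_⟩
      · intro x hx
        have := hall x hx
        simpa using this
      · have hc : c ≠ '0' := by simpa using hhead
        simp only [Bool.and_true, beq_eq_false_iff_ne, ne_eq]
        exact fun h => hc h.symm

-- sorted2 with keys (k1, k2) is sorted with the lexicographic product key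
lemma pv_sorted2_eq_sorted_lex {α : Type} (xs : List α) (k1 : α → Int) (k2 : α → String) :
    PySem.List.sorted2 xs k1 k2 = PySem.List.sorted xs (fun x => toLex (k1 x, k2 x)) := by
  rw [PySem.List.sorted_eq_foldl_insertBy]
  show List.foldl (fun acc x => PySem.List.insertBy _ x acc) [] xs = _
  have hfun : (fun a b => decide (k1 a < k1 b) || (!decide (k1 b < k1 a) && decide (k2 a < k2 b)))
      = (fun a b => decide (toLex (k1 a, k2 a) < toLex (k1 b, k2 b))) := by
    funext a b
    rw [Bool.eq_iff_iff]
    simp only [Bool.or_eq_true, Bool.and_eq_true, Bool.not_eq_true', decide_eq_true_eq,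
      decide_eq_false_iff_not, Prod.Lex.lt_iff, ofLex_toLex]
    constructor
    · rintro (h | ⟨h1, h2⟩)
      · exact Or.inl h
      · rcases lt_trichotomy (k1 a) (k1 b) with h | h | h
        · exact Or.inl h
        · exact Or.inr ⟨h, h2⟩
        · exact absurd h h1
    · rintro (h | ⟨h1, h2⟩)
      · exact Or.inl h
      · refine Or.inr ⟨?_, h2⟩
        rw [h1]
        exact lt_irrefl _
  rw [hfun]
  rfl

-- the gap scan: on a strictly value-sorted list of canonical numerals it returns the
-- least value ≥ i that does not occur
lemma gapScan_spec : ∀ (l : List String) (i : Int), 1 ≤ i →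
    (∀ s ∈ l, pvCanon s.toList) →
    l.Pairwise (fun a b => pvVal a.toList < pvVal b.toList) →
    (∀ s ∈ l, i ≤ (pvVal s.toList : Int)) →
    i ≤ gapScan l i ∧
    (∀ j : Int, i ≤ j → j < gapScan l i → ∃ s ∈ l, (pvVal s.toList : Int) = j) ∧
    (∀ s ∈ l, (pvVal s.toList : Int) ≠ gapScan l i) := by
  intro l
  induction l with
  | nil =>
    intro i hi _ _ _
    refine ⟨le_refl i, ?_, by simp⟩
    intro j h1 h2
    simp only [gapScan] at h2
    omega
  | cons s rest ih =>
    intro i hi hc hp hlb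
    have hps := List.pairwise_cons.mp hp
    by_cases hs : s = PySem.Int.toStr i
    · have hvs : (pvVal s.toList : Int) = i := by rw [hs]; exact pv_val_toStr i (by omega)
      have hrest := ih (i + 1) (by omega) (fun t ht => hc t (by simp [ht])) hps.2
        (fun t ht => by have := hps.1 t ht; omega)
      have hgap : gapScan (s :: rest) i = gapScan rest (i + 1) := by
        simp [gapScan, hs]
      rw [hgap]
      refine ⟨by omega, ?_, ?_⟩
      · intro j hij hjlt
        by_cases hji : j = i
        · exact ⟨s, by simp, by omega⟩
        · obtain ⟨t, ht, hvt⟩ := hrest.2.1 j (by omega) hjlt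
          exact ⟨t, by simp [ht], hvt⟩
      · intro t ht
        rcases List.mem_cons.mp ht with rfl | ht'
        · have := hrest.1; omega
        · exact hrest.2.2 t ht'
    · have hgap : gapScan (s :: rest) i = i := by simp [gapScan, hs]
      rw [hgap]
      have hsv : i ≤ (pvVal s.toList : Int) := hlb s (by simp)
      have hsne : (pvVal s.toList : Int) ≠ i := by
        intro hv
        apply hs
        have h1 := pv_canon_eq_toStr s (hc s (by simp))
        rw [h1, hv]
      refine ⟨le_refl i, ?_, ?_⟩
      · intro j h1 h2; omega
      · intro t ht
        rcases List.mem_cons.mp ht with rfl | ht'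
        · exact hsne
        · have := hps.1 t ht'
          omega

-- A's loop = first free candidate among i, i+1, …, i+fuel-1 (default: the next candidate)
lemma gsLoop_eq (base : String) (existing : List String) :
    ∀ (fuel : Nat) (i : Int),
      gsLoop base existing i fuel =
        (((PySem.List.pyRange i (i + (fuel : Int)) 1).map (fun j => base ++ PySem.Int.toStr j)).find?
          (fun c => !(existing.contains c))).getD (base ++ PySem.Int.toStr (i + (fuel : Int)))
  | 0, i => by
    rw [PySem.List.pyRange_one_eq_nil (by omega : i + ((0 : Nat) : Int) ≤ i)]
    simp [gsLoop]
  | fuel + 1, i => by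
    rw [PySem.List.pyRange_one_cons (by push_cast; omega : i < i + ((fuel + 1 : Nat) : Int))]
    simp only [List.map_cons, List.find?_cons]
    by_cases h : existing.contains (base ++ PySem.Int.toStr i)
    · simp only [gsLoop, h, if_true, Bool.not_true]
      rw [gsLoop_eq base existing fuel (i + 1)]
      have : i + 1 + (fuel : Int) = i + ((fuel + 1 : Nat) : Int) := by push_cast; ring
      rw [this]
    · have h' : ¬ base ++ PySem.Int.toStr i ∈ existing := by simpa using h
      simp [gsLoop, h']

-- first-match characterisation of find? over a mapped range
lemma pv_find_range (f : Int → String) (p : String → Bool) :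
    ∀ (n : Nat) (a m : Int), a ≤ m → m < a + (n : Int) →
    (∀ j : Int, a ≤ j → j < m → p (f j) = false) → p (f m) = true →
    ((PySem.List.pyRange a (a + (n : Int)) 1).map f).find? p = some (f m) := by
  intro n
  induction n with
  | zero =>
    intro a m h1 h2 _ _
    simp only [Nat.cast_zero] at h2
    omega
  | succ n ihn =>
    intro a m h1 h2 hfail hsucc
    rw [PySem.List.pyRange_one_cons (by push_cast; omega : a < a + ((n + 1 : Nat) : Int))]
    simp only [List.map_cons, List.find?_cons]
    by_cases hm : m = a
    · subst hm
      rw [hsucc]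
    · have hfa : p (f a) = false := hfail a (le_refl a) (by omega)
      rw [hfa]
      have : a + ((n + 1 : Nat) : Int) = (a + 1) + (n : Int) := by push_cast; ring
      rw [this]
      exact ihn (a + 1) m (by omega) (by push_cast at h2 ⊢; omega)
        (fun j hj1 hj2 => hfail j (by omega) hj2) hsucc

-- pigeonhole: if base+str(j) ∈ existing for all 1 ≤ j < m then m ≤ |existing| + 1
lemma pv_le_of_all_mem (base : String) (existing : List String) (m : Int) (h1 : 1 ≤ m)
    (h : ∀ j : Int, 1 ≤ j → j < m → (base ++ PySem.Int.toStr j) ∈ existing) :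
    m ≤ (existing.length : Int) + 1 := by
  by_contra hcon
  rw [not_le] at hcon
  set M := (PySem.List.pyRange 1 m 1).map (fun j => base ++ PySem.Int.toStr j) with hM
  have hnodup : M.Nodup := by
    refine List.Nodup.map_on ?_ (PySem.List.nodup_pyRange_one _ _)
    intro x hx y hy hxy
    have hx1 := (PySem.List.mem_pyRange_one.mp hx).1
    have hy1 := (PySem.List.mem_pyRange_one.mp hy).1
    exact pv_toStr_inj (by omega) (by omega) ((String.append_right_inj base).mp hxy)
  have hsub : ∀ x ∈ M, x ∈ existing := by
    intro x hx
    obtain ⟨j, hj, rfl⟩ := List.mem_map.mp hx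
    have := PySem.List.mem_pyRange_one.mp hj
    exact h j this.1 this.2
  have hlen : M.length = (m - 1).toNat := by
    rw [hM, List.length_map, PySem.List.length_pyRange_one]
  have hcard : M.toFinset.card ≤ existing.toFinset.card :=
    Finset.card_le_card (fun x hx => List.mem_toFinset.mpr (hsub x (List.mem_toFinset.mp hx)))
  rw [List.toFinset_card_of_nodup hnodup] at hcard
  have := existing.toFinset_card_le
  omega

-- assembly: everything about one fixed base and list of existing codes
lemma pv_main (base : String) (existing : List String) :
    (if existing.contains base then gsLoop base existing 1 (existing.length + 1) else base) =
    (if PySem.Set.contains (PySem.Set.ofList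
        ((existing.filter fun c => PySem.Str.startswith c base).map
          (fun c => PySem.Str.slice c (some (PySem.Str.len base)) none))) "" then
      base ++ PySem.Int.toStr (gapScan (PySem.List.sorted2
        ((PySem.Set.ofList ((existing.filter fun c => PySem.Str.startswith c base).map
          (fun c => PySem.Str.slice c (some (PySem.Str.len base)) none))).filter
          (fun s => PySem.Str.strIsdigit s && !PySem.Str.startswith s "0"))
        (fun s => PySem.Str.len s) (fun s => s)) 1)
    else base) := by
  set L := (existing.filter fun c => PySem.Str.startswith c base).map
      (fun c => PySem.Str.slice c (some (PySem.Str.len base)) none) with hL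
  set S : PySem.Set String := PySem.Set.ofList L with hS
  have hmem : ∀ d : String, d ∈ L ↔ base ++ d ∈ existing := by
    intro d
    constructor
    · intro hd
      obtain ⟨c, hcf, rfl⟩ := List.mem_map.mp hd
      obtain ⟨hcmem, hcs⟩ := List.mem_filter.mp hcf
      rw [PySem.Str.startswith_eq] at hcs
      obtain ⟨rest, hr⟩ := (PySem.Chars.startswith_iff c.toList base.toList).mp hcs
      have hslice : (PySem.Str.slice c (some (PySem.Str.len base)) none).toList = rest := by
        rw [PySem.Str.toList_slice, PySem.Chars.slice_eq_listSlice, PySem.Str.len_eq,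
            PySem.List.slice_from_natCast, ← hr, List.drop_left]
      have heq : base ++ PySem.Str.slice c (some (PySem.Str.len base)) none = c := by
        apply String.toList_inj.mp
        rw [String.toList_append, hslice, hr]
      rw [heq]
      exact hcmem
    · intro hd
      apply List.mem_map.mpr
      refine ⟨base ++ d, List.mem_filter.mpr ⟨hd, ?_⟩, ?_⟩
      · rw [PySem.Str.startswith_eq]
        exact (PySem.Chars.startswith_iff _ _).mpr ⟨d.toList, by rw [← String.toList_append]⟩
      · apply String.toList_inj.mp
        rw [PySem.Str.toList_slice, PySem.Chars.slice_eq_listSlice, PySem.Str.len_eq,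
            PySem.List.slice_from_natCast, String.toList_append, List.drop_left]
  have hcond : PySem.Set.contains S "" = existing.contains base := by
    rw [Bool.eq_iff_iff]
    rw [PySem.Set.contains_iff, hS, PySem.Set.mem_ofList, hmem "", String.append_empty]
    rw [List.contains_iff_mem]
  rw [hcond]
  by_cases hbm : existing.contains base = true
  · rw [if_pos hbm, if_pos hbm]
    set ns := S.filter (fun s => PySem.Str.strIsdigit s && !PySem.Str.startswith s "0") with hns
    set numerals := PySem.List.sorted2 ns (fun s => PySem.Str.len s) (fun s => s) with hNum
    have hperm : numerals.Perm ns := PySem.List.sorted2_perm ns _ _ false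
    have hmemN : ∀ t : String, t ∈ numerals ↔ (pvCanon t.toList ∧ base ++ t ∈ existing) := by
      intro t
      rw [hperm.mem_iff, hns, List.mem_filter, pv_pred_iff, hS, PySem.Set.mem_ofList, hmem t]
      tauto
    have hnodupN : numerals.Nodup :=
      hperm.nodup_iff.mpr (List.Nodup.filter _ (PySem.Set.nodup_ofList L))
    have hcanon_all : ∀ t ∈ numerals, pvCanon t.toList := fun t ht => ((hmemN t).mp ht).1
    have hpairN : numerals.Pairwise (fun a b => pvVal a.toList < pvVal b.toList) := by
      have h1 : numerals.Pairwise (fun a b =>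
          (fun s => toLex (PySem.Str.len s, s)) a ≤ (fun s => toLex (PySem.Str.len s, s)) b) := by
        rw [hNum, pv_sorted2_eq_sorted_lex]
        exact PySem.List.sorted_pairwise ns _
      have hand := h1.and hnodupN
      refine List.Pairwise.imp_of_mem ?_ hand
      intro a b ha hb hab
      obtain ⟨hle, hneq⟩ := hab
      have hklt : toLex (PySem.Str.len a, a) < toLex (PySem.Str.len b, b) := by
        apply lt_of_le_of_ne hle
        intro he
        exact hneq (congrArg (fun p => (ofLex p).2) he)
      rw [Prod.Lex.lt_iff] at hklt
      simp only [ofLex_toLex] at hklt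
      apply pv_key_val_lt a.toList b.toList ((hmemN a).mp ha).1 ((hmemN b).mp hb).1
      rcases hklt with hlt | ⟨heq, hslt⟩
      · left
        rw [PySem.Str.len_eq, PySem.Str.len_eq] at hlt
        exact_mod_cast hlt
      · right
        constructor
        · rw [PySem.Str.len_eq, PySem.Str.len_eq] at heq
          exact_mod_cast heq
        · exact String.lt_iff_toList_lt.mp hslt
    have hlb : ∀ t ∈ numerals, (1:Int) ≤ (pvVal t.toList : Int) := by
      intro t ht
      have := pv_canon_pos t.toList (hcanon_all t ht)
      exact_mod_cast this
    obtain ⟨hm1, hmid, hnone⟩ :=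
      gapScan_spec numerals 1 (le_refl 1) hcanon_all hpairN hlb
    set m := gapScan numerals 1 with hm
    have hin : ∀ j : Int, 1 ≤ j → j < m → base ++ PySem.Int.toStr j ∈ existing := by
      intro j h1 h2
      obtain ⟨t, ht, hvt⟩ := hmid j h1 h2
      have heq : t = PySem.Int.toStr j := by
        rw [pv_canon_eq_toStr t (hcanon_all t ht), hvt]
      rw [← heq]
      exact ((hmemN t).mp ht).2
    have hout : base ++ PySem.Int.toStr m ∉ existing := by
      intro hcon
      have hcanm : pvCanon (PySem.Int.toStr m).toList := by
        rw [pv_toList_toStr_nonneg m (by omega)]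
        exact pv_canon_toDigits _ (by omega)
      have hmm := hnone _ ((hmemN _).mpr ⟨hcanm, hcon⟩)
      rw [pv_val_toStr m (by omega)] at hmm
      exact hmm rfl
    have hm2 : m ≤ (existing.length : Int) + 1 := pv_le_of_all_mem base existing m hm1 hin
    rw [gsLoop_eq]
    rw [pv_find_range (fun j => base ++ PySem.Int.toStr j) (fun c => !(existing.contains c))
      (existing.length + 1) 1 m hm1 (by push_cast; omega)
      (fun j h1 h2 => by simpa using hin j h1 h2)
      (by simpa using hout)]
    rfl
  · rw [if_neg hbm, if_neg hbm]

-- ===== VERDICT (by name: the statement is the Claim_ definition above) =====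
theorem generate_shortcode_spec : Claim_equal_generate_shortcode := by
  intro name existing _dom
  unfold Spec_generate_shortcode generate_shortcode generate_shortcode_alt
  exact pv_main (PySem.Str.upper (PySem.Str.slice name none (some 3))) existing
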